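-- pv_equiv track=rewrite | github.com/svanis71/codewars | codewars.python/kyu7/freed_prisoners.py | freed_prisoners
-- ===== SOURCE A (Python) =====
-- def freed_prisoners(prisoners: list[bool]) -> int:
--     if not prisoners[0]:
--         return 0
--     cnt = 0
--     while len(prisoners) > 0:
--         cnt += (1 if prisoners[0] else 0)
--         prisoners = [not status for status in prisoners]
--         while True:
--             if len(prisoners) == 0 or prisoners[0]:
--                 break
--             prisoners.pop(0)
--
--     return cnt
-- ===== SOURCE B (Python) =====
-- def freed_prisoners(prisoners: list[bool]) -> int:
--     if not prisoners[0]: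
--         return 0
--     cnt = 0
--     for p in prisoners:
--         if p == (cnt % 2 == 0):
--             cnt += 1
--     return cnt
-- ===== Notes on version B (the rewrite author's own statement) =====
-- stated objective: alternative
-- what changed: Replaced A's repeated whole-list negation and pop(0) prefix removal with a single left-to-right pass that tracks the number of flips via the parity of the running count, so no intermediate list is ever rebuilt.
import Mathlib
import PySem

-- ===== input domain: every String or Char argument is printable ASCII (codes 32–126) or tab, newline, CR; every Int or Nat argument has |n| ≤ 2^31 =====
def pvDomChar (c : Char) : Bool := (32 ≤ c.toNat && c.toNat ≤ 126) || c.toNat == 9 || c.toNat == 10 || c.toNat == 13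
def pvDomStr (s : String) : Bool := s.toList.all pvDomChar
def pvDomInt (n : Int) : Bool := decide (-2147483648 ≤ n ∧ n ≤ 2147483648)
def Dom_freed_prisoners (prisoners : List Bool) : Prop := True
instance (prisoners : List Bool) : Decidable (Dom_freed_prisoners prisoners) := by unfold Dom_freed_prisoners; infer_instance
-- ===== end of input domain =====

-- B replaces A's repeated list-flip-and-pop passes with one pass tracking flip parity in the count.

-- ===== PORT A =====
-- the inner 'while True: ... pop(0)' loop: drop leading Falses
def fpDropA : List Bool → List Bool
  | [] => []
  | b :: rest => if b then b :: rest else fpDropA rest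

-- termination measure for A's outer while loop
def fpMeasA (l : List Bool) : Nat :=
  2 * l.length + (match l with | false :: _ => 1 | _ => 0)

theorem fpDropA_measure (l : List Bool) : fpMeasA (fpDropA l) ≤ 2 * l.length := by
  induction l with
  | nil => simp [fpDropA, fpMeasA]
  | cons b rest ih =>
    cases b
    · rw [show fpDropA (false :: rest) = fpDropA rest from by simp [fpDropA]]
      simp only [List.length_cons]
      omega
    · rw [show fpDropA (true :: rest) = true :: rest from by simp [fpDropA]]
      simp [fpMeasA]

-- A's outer 'while len(prisoners) > 0' loop
def fpLoopA : List Bool → Int → Int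
  | [], cnt => cnt
  | b :: rest, cnt =>
      fpLoopA (fpDropA ((!b) :: rest.map not)) (cnt + (if b then 1 else 0))
termination_by l _ => fpMeasA l
decreasing_by
  cases b
  · -- head False: flipped head is true, fpDropA keeps the whole list
    simp only [List.map_subtype, List.unattach_attach]
    simp [fpDropA, fpMeasA]
  · have h := fpDropA_measure (rest.map not)
    simp only [List.map_subtype, List.unattach_attach]
    rw [show fpDropA ((!true) :: rest.map not) = fpDropA (rest.map not) from by simp [fpDropA]]
    have hm : fpMeasA (true :: rest) = 2 * (rest.length + 1) := by simp [fpMeasA]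
    rw [hm]
    simp only [List.length_map] at h
    omega

def freed_prisoners (prisoners : List Bool) : Int :=
  match PySem.List.pyGet? prisoners 0 with
  | none => 0          -- Python raises IndexError here; excluded by Pre_
  | some b => if !b then 0 else fpLoopA prisoners 0

-- ===== PORT B =====
def freed_prisoners_alt (prisoners : List Bool) : Int :=
  match PySem.List.pyGet? prisoners 0 with
  | none => 0          -- Python raises IndexError here; excluded by Pre_
  | some b =>
    if !b then 0
    else prisoners.foldl (fun cnt p => if p = decide (cnt % 2 = 0) then cnt + 1 else cnt) 0

-- ===== PRECONDITION & SPEC =====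
-- Python A (and B) raise IndexError on the empty list; Pre_ excludes exactly that input.
def Pre_freed_prisoners (prisoners : List Bool) : Prop := prisoners ≠ []
instance (prisoners : List Bool) : Decidable (Pre_freed_prisoners prisoners) := by unfold Pre_freed_prisoners; infer_instance
def pvWitness_freed_prisoners : List Bool := [true, false, true]

def Spec_freed_prisoners (prisoners : List Bool) (out : Int) : Prop := out = freed_prisoners_alt prisoners
instance (prisoners : List Bool) (out : Int) : Decidable (Spec_freed_prisoners prisoners out) := by unfold Spec_freed_prisoners; infer_instance

-- ===== CLAIM (what is proved, stated in full; the proofs are below) =====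
def Claim_equal_freed_prisoners : Prop := ∀ (prisoners : List Bool), Dom_freed_prisoners prisoners → Pre_freed_prisoners prisoners → Spec_freed_prisoners prisoners (freed_prisoners prisoners)

-- ===== LEMMAS AND PROOFS =====

theorem fpDropA_len_le (l : List Bool) : (fpDropA l).length ≤ l.length := by
  induction l with
  | nil => simp [fpDropA]
  | cons b rest ih =>
    simp only [fpDropA]
    split
    · simp
    · exact Nat.le_succ_of_le ih

-- the common semantics: count freed prisoners scanning left to right with a flip bit
def fpCount : List Bool → Bool → Int
  | [], _ => 0
  | p :: rest, flip => if p ≠ flip then 1 + fpCount rest (!flip) else fpCount rest flip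

theorem fpCount_map_not (l : List Bool) (flip : Bool) :
    fpCount (l.map not) flip = fpCount l (!flip) := by
  induction l generalizing flip with
  | nil => simp [fpCount]
  | cons p rest ih =>
    cases p <;> cases flip <;> simp [fpCount, ih]

theorem fpCount_dropA (l : List Bool) : fpCount (fpDropA l) false = fpCount l false := by
  induction l with
  | nil => rfl
  | cons b rest ih =>
    cases b <;> simp [fpDropA, fpCount, ih]

theorem fpLoopA_eq (n : Nat) :
    ∀ (l : List Bool) (cnt : Int), l.length ≤ n → (l = [] ∨ ∃ r, l = true :: r) →
      fpLoopA l cnt = cnt + fpCount l false := by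
  induction n with
  | zero =>
    intro l cnt hlen hinv
    rcases hinv with h | ⟨r, h⟩
    · subst h; simp [fpLoopA, fpCount]
    · subst h; simp at hlen
  | succ n ih =>
    intro l cnt hlen hinv
    rcases hinv with h | ⟨r, h⟩
    · subst h; simp [fpLoopA, fpCount]
    · subst h
      have hstep : fpLoopA (true :: r) cnt = fpLoopA (fpDropA (r.map not)) (cnt + 1) := by
        simp [fpLoopA, fpDropA]
      rw [hstep]
      have hinv' : fpDropA (r.map not) = [] ∨ ∃ r', fpDropA (r.map not) = true :: r' := by
        generalize r.map not = xs
        induction xs with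
        | nil => exact Or.inl rfl
        | cons b rest ih2 =>
          cases b
          · simpa [fpDropA] using ih2
          · exact Or.inr ⟨rest, by simp [fpDropA]⟩
      have hlen' : (fpDropA (r.map not)).length ≤ n := by
        have := fpDropA_len_le (r.map not)
        simp at hlen this
        omega
      rw [ih _ _ hlen' hinv', fpCount_dropA, fpCount_map_not]
      simp only [fpCount, Bool.not_false]
      rw [if_pos (by simp)]
      omega

theorem foldlB_eq (l : List Bool) :
    ∀ cnt : Int,
      l.foldl (fun cnt p => if p = decide (cnt % 2 = 0) then cnt + 1 else cnt) cnt
        = cnt + fpCount l (!decide (cnt % 2 = 0)) := by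
  induction l with
  | nil => intro cnt; simp [fpCount]
  | cons p rest ih =>
    intro cnt
    simp only [List.foldl]
    by_cases h : p = decide (cnt % 2 = 0)
    · rw [if_pos h, ih]
      have hiff : ((cnt + 1) % 2 = 0) ↔ ¬ (cnt % 2 = 0) := by omega
      have hpar : decide ((cnt + 1) % 2 = 0) = !decide (cnt % 2 = 0) := by
        rw [decide_eq_decide.mpr hiff, decide_not]
      rw [hpar, Bool.not_not]
      have hne : p ≠ !decide (cnt % 2 = 0) := by subst h; simp
      simp only [fpCount]
      rw [if_pos hne, Bool.not_not]
      omega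
    · have hp : p = !decide (cnt % 2 = 0) := by cases p <;> simp_all
      rw [if_neg h, ih]
      simp only [fpCount]
      rw [if_neg (by simp [hp])]
  
-- ===== VERDICT (by name: the statement is the Claim_ definition above) =====
theorem freed_prisoners_spec : Claim_equal_freed_prisoners := by
  intro prisoners _ hpre
  unfold Spec_freed_prisoners freed_prisoners freed_prisoners_alt
  cases prisoners with
  | nil => exact absurd rfl hpre
  | cons b rest =>
    cases b
    · simp [PySem.List.pyGet?, PySem.List.pyIdx?]
    · have hg : PySem.List.pyGet? (true :: rest) 0 = some true := by
        simp [PySem.List.pyGet?, PySem.List.pyIdx?]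
      rw [hg]
      have hA := fpLoopA_eq (rest.length + 1) (true :: rest) 0 (by simp) (Or.inr ⟨rest, rfl⟩)
      have hB := foldlB_eq (true :: rest) 0
      simp only [Bool.not_true]
      rw [if_neg (by simp), if_neg (by simp), hA, hB]
      norm_num
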